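-- pv_equiv track=rewrite | github.com/jay-thakur/geeksforgeeks_py | practice/Basic/swap_and_maximize.py | swap_and_maximize
-- ===== SOURCE A (Python) =====
-- def swap_and_maximize(arr, size):
--     arr.sort()
--     lst1 = []
--     for i in range(size // 2):
--         lst1.append(arr[i])
--         lst1.append(arr[size - i - 1])
--     if size % 2 != 0:
--         lst1.append(arr[size // 2])
--     lst1.append(arr[0])
--     sum = 0
--     for i in range(size):
--         sum += abs(lst1[i] - lst1[i + 1])
--     return sum
-- ===== SOURCE B (Python) =====
-- def swap_and_maximize(arr, size):
--     # two-pointer closed form: each outer pair contributes 2*(high - low)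
--     arr.sort()
--     total = 0
--     i, j = 0, size - 1
--     while i < j:
--         total += 2 * (arr[j] - arr[i])
--         i += 1
--         j -= 1
--     return total
-- ===== Notes on version B (the rewrite author's own statement) =====
-- stated objective: simpler
-- what changed: B drops A's construction of the alternating arrangement list and its second abs-difference pass, summing 2*(arr[j]-arr[i]) directly with two pointers over the sorted array.
import Mathlib
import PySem

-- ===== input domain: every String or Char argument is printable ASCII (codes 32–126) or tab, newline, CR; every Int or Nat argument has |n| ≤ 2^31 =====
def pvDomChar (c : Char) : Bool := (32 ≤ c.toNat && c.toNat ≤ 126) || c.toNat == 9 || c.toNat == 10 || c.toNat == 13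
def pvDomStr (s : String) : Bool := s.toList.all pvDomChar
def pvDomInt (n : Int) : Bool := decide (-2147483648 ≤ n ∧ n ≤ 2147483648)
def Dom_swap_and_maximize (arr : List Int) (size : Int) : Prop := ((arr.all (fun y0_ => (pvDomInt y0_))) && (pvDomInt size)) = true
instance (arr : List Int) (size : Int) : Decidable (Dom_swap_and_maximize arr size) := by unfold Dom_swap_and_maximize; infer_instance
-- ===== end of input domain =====

-- B replaces A's construction of the alternating arrangement plus a second abs-difference pass by a
-- single two-pointer scan over the sorted array (objective: simpler). Both A and B sort arr in place;
-- the equivalence proved here is about the return value (the mutation is identical).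

-- ===== PORT A =====
def swap_and_maximize (arr : List Int) (size : Int) : Int :=
  let t := PySem.List.sorted arr (fun x => x) false
  let lst1 := (PySem.List.pyRange 0 (PySem.Int.floordiv size 2) 1).foldl
      (fun l i => (l ++ [PySem.List.pyGetD t i 0]) ++ [PySem.List.pyGetD t (size - i - 1) 0]) []
  let lst2 := if PySem.Int.mod size 2 ≠ 0
      then lst1 ++ [PySem.List.pyGetD t (PySem.Int.floordiv size 2) 0] else lst1
  let lst3 := lst2 ++ [PySem.List.pyGetD t 0 0]
  (PySem.List.pyRange 0 size 1).foldl
      (fun s i => s + |PySem.List.pyGetD lst3 i 0 - PySem.List.pyGetD lst3 (i + 1) 0|) 0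

-- ===== PORT B =====
def altLoop (t : List Int) (i j total : Int) : Int :=
  if i < j then
    altLoop t (i + 1) (j - 1) (total + 2 * (PySem.List.pyGetD t j 0 - PySem.List.pyGetD t i 0))
  else total
termination_by (j - i).toNat
decreasing_by omega

def swap_and_maximize_alt (arr : List Int) (size : Int) : Int :=
  altLoop (PySem.List.sorted arr (fun x => x) false) 0 (size - 1) 0

-- ===== PRECONDITION & SPEC =====
-- Pre_ is exactly the set of inputs on which the Python A returns (elsewhere it raises IndexError):
-- arr nonempty, size ≤ len(arr), and for odd size the middle index size//2 must be in range
-- (only binding for negative odd size, where it is a negative Python index).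
def Pre_swap_and_maximize (arr : List Int) (size : Int) : Prop :=
  arr ≠ [] ∧ size ≤ (arr.length : Int) ∧
    (PySem.Int.mod size 2 = 0 ∨ 0 ≤ PySem.Int.floordiv size 2 + (arr.length : Int))
instance (arr : List Int) (size : Int) : Decidable (Pre_swap_and_maximize arr size) := by
  unfold Pre_swap_and_maximize; infer_instance
def pvWitness_swap_and_maximize : List Int × Int := ([4, 1, 3, 2], 4)

def Spec_swap_and_maximize (arr : List Int) (size : Int) (out : Int) : Prop := out = swap_and_maximize_alt arr size
instance (arr : List Int) (size : Int) (out : Int) : Decidable (Spec_swap_and_maximize arr size out) := by unfold Spec_swap_and_maximize; infer_instance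

-- ===== CLAIM (what is proved, stated in full; the proofs are below) =====
def Claim_equal_swap_and_maximize : Prop := ∀ (arr : List Int) (size : Int), Dom_swap_and_maximize arr size → Pre_swap_and_maximize arr size → Spec_swap_and_maximize arr size (swap_and_maximize arr size)

-- ===== LEMMAS AND PROOFS =====

-- The alternating arrangement A builds, from pair k on (proof-side model of lst3).
def Rlist (t : List Int) (n k : Nat) : List Int :=
  if k < n / 2 then t.getD k 0 :: t.getD (n - 1 - k) 0 :: Rlist t n (k + 1)
  else (if n % 2 ≠ 0 then [t.getD (n / 2) 0] else []) ++ [t.getD 0 0]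
termination_by n / 2 - k

-- Sum of (upper − lower) over the pairs from k on.
def S (t : List Int) (n k : Nat) : Int :=
  if k < n / 2 then (t.getD (n - 1 - k) 0 - t.getD k 0) + S t n (k + 1) else 0
termination_by n / 2 - k

-- Sum of |adjacent differences|.
def pairSum : List Int → Int
  | a :: b :: r => |a - b| + pairSum (b :: r)
  | _ => 0

-- Index of the head of Rlist t n k.
def hdIdx (n k : Nat) : Nat :=
  if k < n / 2 then k else if n % 2 ≠ 0 then n / 2 else 0


-- head of Rlist is the element at index hdIdx
lemma hdR (t : List Int) (n k : Nat) :
    ∃ rest, Rlist t n k = t.getD (hdIdx n k) 0 :: rest := by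
  rw [Rlist, hdIdx]
  by_cases h : k < n / 2
  · simp [h]
  · by_cases ho : n % 2 ≠ 0 <;> simp [h, ho]

lemma foldl2 (r : List Int) (f g : Int → Int) (acc : List Int) :
    r.foldl (fun l i => (l ++ [f i]) ++ [g i]) acc = acc ++ r.flatMap (fun i => [f i, g i]) := by
  induction r generalizing acc with
  | nil => simp
  | cons x xs ih => rw [List.foldl_cons, ih]; simp [List.flatMap_cons, List.append_assoc]

lemma flat_R (t : List Int) (n : Nat) : ∀ d k, n / 2 - k = d → k ≤ n / 2 →
    ((PySem.List.pyRange (k : Int) ((n / 2 : Nat) : Int) 1).flatMap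
        (fun i => [PySem.List.pyGetD t i 0, PySem.List.pyGetD t ((n : Int) - i - 1) 0]))
      ++ ((if n % 2 ≠ 0 then [t.getD (n / 2) 0] else []) ++ [t.getD 0 0]) = Rlist t n k := by
  intro d
  induction d with
  | zero =>
    intro k hd hk
    have hk' : k = n / 2 := by omega
    subst hk'
    rw [PySem.List.pyRange_one_eq_nil (le_refl _), Rlist]
    simp
  | succ d ih =>
    intro k hd hk
    have hlt : k < n / 2 := by
      omega
    rw [PySem.List.pyRange_one_cons (by exact_mod_cast hlt), List.flatMap_cons,
      Rlist, if_pos hlt]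
    have hcast : (n : Int) - (k : Int) - 1 = ((n - 1 - k : Nat) : Int) := by omega
    simp only [List.cons_append, List.nil_append, hcast,
      PySem.List.pyGetD_natCast]
    refine congrArg₂ _ ?_ (congrArg₂ _ ?_ ?_)
    · simp
    · simp
    · have h1 : ((k : Int) + 1) = ((k + 1 : Nat) : Int) := by omega
      rw [h1]
      exact ih (k + 1) (by omega) (by omega)

lemma lenR (t : List Int) (n : Nat) : ∀ d k, n / 2 - k = d → k ≤ n / 2 →
    (Rlist t n k).length = 2 * (n / 2 - k) + n % 2 + 1 := by
  intro d
  induction d with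
  | zero =>
    intro k hd hk
    rw [Rlist]
    split_ifs with h1 h2 <;> simp <;> omega
  | succ d ih =>
    intro k hd hk
    rw [Rlist, if_pos (by omega)]
    simp only [List.length_cons, ih (k + 1) (by omega) (by omega)]
    omega

lemma pairSum_short (l : List Int) (h : l.length ≤ 1) : pairSum l = 0 := by
  match l, h with
  | [], _ => rfl
  | [a], _ => rfl

lemma drop_pairSum (l : List Int) (k : Nat) (h : k + 2 ≤ l.length) :
    pairSum (l.drop k) = |l.getD k 0 - l.getD (k + 1) 0| + pairSum (l.drop (k + 1)) := by
  rw [List.drop_eq_getElem_cons (by omega), List.drop_eq_getElem_cons (l := l) (i := k + 1) (by omega)]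
  rw [List.getD_eq_getElem _ _ (by omega), List.getD_eq_getElem _ _ (by omega)]
  rfl

lemma sumfold (l : List Int) (n : Nat) (hl : l.length = n + 1) :
    ∀ d k (c : Int), n - k = d → k ≤ n →
    (PySem.List.pyRange (k : Int) (n : Int) 1).foldl
        (fun s i => s + |PySem.List.pyGetD l i 0 - PySem.List.pyGetD l (i + 1) 0|) c
      = c + pairSum (l.drop k) := by
  intro d
  induction d with
  | zero =>
    intro k c hd hk
    have hk' : k = n := by omega
    subst hk'
    rw [PySem.List.pyRange_one_eq_nil (le_refl _), List.foldl_nil,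
      pairSum_short _ (by simp [hl])]
    ring
  | succ d ih =>
    intro k c hd hk
    have hlt : k < n := by omega
    rw [PySem.List.pyRange_one_cons (by exact_mod_cast hlt), List.foldl_cons]
    have h1 : ((k : Int) + 1) = ((k + 1 : Nat) : Int) := by omega
    rw [h1, ih (k + 1) _ (by omega) (by omega), drop_pairSum l k (by omega)]
    simp only [PySem.List.pyGetD_natCast]
    ring

lemma hdIdx_le (n k : Nat) (hk : k < n / 2) : hdIdx n (k + 1) ≤ n - 1 - k := by
  rw [hdIdx]; split_ifs <;> omega

lemma pairR (t : List Int) (n : Nat)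
    (hmono : ∀ p q : Nat, p ≤ q → q < t.length → t.getD p 0 ≤ t.getD q 0)
    (hn : n ≤ t.length) (h1 : 1 ≤ n) :
    ∀ d k, n / 2 - k = d → k ≤ n / 2 →
    pairSum (Rlist t n k) = 2 * S t n k + t.getD (hdIdx n k) 0 - t.getD 0 0 := by
  intro d
  induction d with
  | zero =>
    intro k hd hk
    have hk' : k = n / 2 := by omega
    subst hk'
    by_cases ho : n % 2 = 0
    · rw [Rlist, if_neg (lt_irrefl (n / 2)), if_neg (by omega : ¬ n % 2 ≠ 0),
        S, if_neg (lt_irrefl (n / 2)), hdIdx, if_neg (lt_irrefl (n / 2)),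
        if_neg (by omega : ¬ n % 2 ≠ 0)]
      simp only [List.nil_append, pairSum]
      ring
    · have hle := hmono 0 (n / 2) (Nat.zero_le _) (by omega)
      rw [Rlist, if_neg (lt_irrefl (n / 2)), if_pos ho,
        S, if_neg (lt_irrefl (n / 2)), hdIdx, if_neg (lt_irrefl (n / 2)), if_pos ho]
      simp only [List.cons_append, List.nil_append, pairSum]
      rw [abs_of_nonneg (by omega)]
      ring
  | succ d ih =>
    intro k hd hk
    have hlt : k < n / 2 := by omega
    obtain ⟨rest, hrest⟩ := hdR t n (k + 1)
    have hA : t.getD k 0 ≤ t.getD (n - 1 - k) 0 := hmono k (n - 1 - k) (by omega) (by omega)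
    have hB : t.getD (hdIdx n (k + 1)) 0 ≤ t.getD (n - 1 - k) 0 :=
      hmono _ _ (hdIdx_le n k hlt) (by omega)
    rw [Rlist, if_pos hlt, hrest]
    simp only [pairSum]
    rw [← hrest, ih (k + 1) (by omega) (by omega),
      abs_of_nonpos (by omega : t.getD k 0 - t.getD (n - 1 - k) 0 ≤ 0),
      abs_of_nonneg (by omega : (0:Int) ≤ t.getD (n - 1 - k) 0 - t.getD (hdIdx n (k + 1)) 0),
      show S t n k = (t.getD (n - 1 - k) 0 - t.getD k 0) + S t n (k + 1) by rw [S, if_pos hlt],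
      show hdIdx n k = k by rw [hdIdx, if_pos hlt]]
    ring

lemma altS (t : List Int) (n : Nat) :
    ∀ d (i j tot : Int), (j - i).toNat = d → 0 ≤ i → j = (n : Int) - 1 - i →
    altLoop t i j tot = tot + 2 * S t n i.toNat := by
  intro d
  induction d using Nat.strong_induction_on with
  | _ d ih =>
    intro i j tot hd h0 hj
    rw [altLoop]
    by_cases hij : i < j
    · rw [if_pos hij,
        ih ((j - 1) - (i + 1)).toNat (by omega) (i + 1) (j - 1) _ rfl (by omega) (by omega)]
      have hgj : PySem.List.pyGetD t j 0 = t.getD (n - 1 - i.toNat) 0 := by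
        rw [show j = ((n - 1 - i.toNat : Nat) : Int) by omega, PySem.List.pyGetD_natCast]
      have hgi : PySem.List.pyGetD t i 0 = t.getD i.toNat 0 := by
        rw [show i = ((i.toNat : Nat) : Int) by omega, PySem.List.pyGetD_natCast, Int.toNat_natCast]
      rw [hgj, hgi, show (i + 1).toNat = i.toNat + 1 by omega,
        show S t n i.toNat = (t.getD (n - 1 - i.toNat) 0 - t.getD i.toNat 0) + S t n (i.toNat + 1) by
          rw [S, if_pos (by omega)]]
      ring
    · rw [if_neg hij, S, if_neg (by omega)]
      ring

lemma sortedD (arr : List Int) :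
    ∀ p q : Nat, p ≤ q → q < (PySem.List.sorted arr (fun x => x) false).length →
    (PySem.List.sorted arr (fun x => x) false).getD p 0 ≤ (PySem.List.sorted arr (fun x => x) false).getD q 0 := by
  intro p q hpq hq
  rw [List.getD_eq_getElem _ _ (by omega), List.getD_eq_getElem _ _ hq]
  exact PySem.List.sorted_id_getElem_mono arr hpq hq

theorem swap_and_maximize_spec : Claim_equal_swap_and_maximize := by
  intro arr size _ hpre
  obtain ⟨hne, hlen, -⟩ := hpre
  simp only [Spec_swap_and_maximize, swap_and_maximize, swap_and_maximize_alt]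
  by_cases hs : 0 < size
  · obtain ⟨n, rfl⟩ : ∃ n : Nat, size = (n : Int) := ⟨size.toNat, by omega⟩
    have hn1 : 1 ≤ n := by omega
    have htlen : (PySem.List.sorted arr (fun x => x) false).length = arr.length :=
      PySem.List.length_sorted arr (fun x => x) false
    have hnlen : n ≤ (PySem.List.sorted arr (fun x => x) false).length := by
      rw [htlen]; omega
    set t := PySem.List.sorted arr (fun x => x) false with ht
    have h2 : PySem.Int.floordiv (n : Int) 2 = ((n / 2 : Nat) : Int) := by
      exact_mod_cast PySem.Int.floordiv_natCast n 2
    have hm : PySem.Int.mod (n : Int) 2 = ((n % 2 : Nat) : Int) := by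
      exact_mod_cast PySem.Int.mod_natCast n 2
    rw [h2, hm, foldl2]
    have hflat := flat_R t n (n / 2) 0 rfl (Nat.zero_le _)
    simp only [Nat.cast_zero] at hflat
    have hlst : (if ((n % 2 : Nat) : Int) ≠ 0 then
          ([] ++ (PySem.List.pyRange 0 ((n / 2 : Nat) : Int) 1).flatMap
              (fun i => [PySem.List.pyGetD t i 0, PySem.List.pyGetD t ((n : Int) - i - 1) 0]))
            ++ [PySem.List.pyGetD t ((n / 2 : Nat) : Int) 0]
        else
          [] ++ (PySem.List.pyRange 0 ((n / 2 : Nat) : Int) 1).flatMap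
              (fun i => [PySem.List.pyGetD t i 0, PySem.List.pyGetD t ((n : Int) - i - 1) 0]))
        ++ [PySem.List.pyGetD t 0 0] = Rlist t n 0 := by
      by_cases hodd : n % 2 = 0
      · rw [if_neg (by simp [hodd])]
        simp only [hodd, List.nil_append] at hflat ⊢
        rw [if_neg (by omega : ¬ (0:Nat) ≠ 0)] at hflat
        simp only [List.nil_append] at hflat
        rw [PySem.List.pyGetD_zero, hflat]
      · rw [if_pos (by exact_mod_cast hodd : ((n % 2 : Nat) : Int) ≠ 0)]
        rw [if_pos hodd] at hflat
        simp only [List.nil_append, List.append_assoc] at hflat ⊢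
        rw [PySem.List.pyGetD_zero, PySem.List.pyGetD_natCast, hflat]
    rw [hlst]
    have hlen3 : (Rlist t n 0).length = n + 1 := by
      have := lenR t n (n / 2) 0 rfl (Nat.zero_le _); omega
    have hsum := sumfold (Rlist t n 0) n hlen3 n 0 0 rfl (Nat.zero_le _)
    push_cast at hsum
    rw [List.drop_zero] at hsum
    rw [hsum]
    have hpair := pairR t n (sortedD arr) hnlen hn1 (n / 2) 0 rfl (Nat.zero_le _)
    have hd0 : hdIdx n 0 = 0 := by rw [hdIdx]; split_ifs <;> omega
    rw [hd0] at hpair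
    have hB := altS t n (((n : Int) - 1) - 0).toNat 0 ((n : Int) - 1) 0 rfl le_rfl (by ring)
    norm_num at hB
    rw [hB, hpair]
    ring
  · rw [PySem.List.pyRange_one_eq_nil (by omega : size ≤ (0:Int)), List.foldl_nil,
      altLoop, if_neg (by omega : ¬ (0:Int) < size - 1)]
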